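-- pv_equiv track=rewrite | github.com/Qiskit/qiskit | qiskit/aqua/utils/subsystem.py | get_subsystems_counts
-- ===== SOURCE A (Python) =====
-- from collections import defaultdict
--
-- def get_subsystems_counts(complete_system_counts, post_select_index=None, post_select_flag=None):
--     """
--     Extract all subsystems' counts from the single complete system count dictionary.
--
--     If multiple classical registers are used to measure various parts of a quantum system,
--     Each of the measurement dictionary's keys would contain spaces as delimiters to separate
--     the various parts being measured. For example, you might have three keys
--     '11 010', '01 011' and '11 011', among many other, in the count dictionary of the
--     5-qubit complete system, and would like to get the two subsystems' counts
--     (one 2-qubit, and the other 3-qubit) in order to get the counts for the 2-qubit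
--     partial measurement '11' or the 3-qubit partial measurement '011'.
--
--     If the post_select_index and post_select_flag parameter are specified, the counts are
--     returned subject to that specific post selection, that is, the counts for all subsystems where
--     the subsystem at index post_select_index is equal to post_select_flag.
--
--
--     Args:
--         complete_system_counts (dict): The measurement count dictionary of a complete system
--             that contains multiple classical registers for measurements s.t. the dictionary's
--             keys have space delimiters.
--         post_select_index (int): Optional, the index of the subsystem to apply the post selection
--             to.
--         post_select_flag (str): Optional, the post selection value to apply to the subsystem
--             at index post_select_index.
--
--     Returns:
--         list: A list of measurement count dictionaries corresponding to
--                 each of the subsystems measured.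
--     """
--     mixed_measurements = list(complete_system_counts)
--     subsystems_counts = [defaultdict(int) for _ in mixed_measurements[0].split()]
--     for mixed_measurement in mixed_measurements:
--         count = complete_system_counts[mixed_measurement]
--         subsystem_measurements = mixed_measurement.split()
--         for k, d_l in zip(subsystem_measurements, subsystems_counts):
--             if (post_select_index is None
--                     or subsystem_measurements[post_select_index] == post_select_flag):
--                 d_l[k] += count
--     return [dict(d) for d in subsystems_counts]
-- ===== SOURCE B (Python) =====
-- def get_subsystems_counts(complete_system_counts, post_select_index=None, post_select_flag=None):
--     table = [(key.split(), count) for key, count in complete_system_counts.items()]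
--     num = len(table[0][0])
--     result = []
--     for idx in range(num):
--         d = {}
--         for parts, count in table:
--             if idx < len(parts) and (post_select_index is None
--                                      or parts[post_select_index] == post_select_flag):
--                 d[parts[idx]] = d.get(parts[idx], 0) + count
--         result.append(d)
--     return result
-- ===== Notes on version B (the rewrite author's own statement) =====
-- stated objective: alternative
-- what changed: A builds all subsystem dicts simultaneously in one pass zipping each key's parts against the dict list; B first splits every key once into a (parts, count) table and then builds each subsystem's dict in its own per-index scan of that table (transposed loop nesting), replacing zip-over-mutable-dicts with independent per-subsystem accumulations.
-- outside the precondition, e.g. on get_subsystems_counts({}, None, None): A raises IndexError, B raises IndexError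
import Mathlib
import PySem

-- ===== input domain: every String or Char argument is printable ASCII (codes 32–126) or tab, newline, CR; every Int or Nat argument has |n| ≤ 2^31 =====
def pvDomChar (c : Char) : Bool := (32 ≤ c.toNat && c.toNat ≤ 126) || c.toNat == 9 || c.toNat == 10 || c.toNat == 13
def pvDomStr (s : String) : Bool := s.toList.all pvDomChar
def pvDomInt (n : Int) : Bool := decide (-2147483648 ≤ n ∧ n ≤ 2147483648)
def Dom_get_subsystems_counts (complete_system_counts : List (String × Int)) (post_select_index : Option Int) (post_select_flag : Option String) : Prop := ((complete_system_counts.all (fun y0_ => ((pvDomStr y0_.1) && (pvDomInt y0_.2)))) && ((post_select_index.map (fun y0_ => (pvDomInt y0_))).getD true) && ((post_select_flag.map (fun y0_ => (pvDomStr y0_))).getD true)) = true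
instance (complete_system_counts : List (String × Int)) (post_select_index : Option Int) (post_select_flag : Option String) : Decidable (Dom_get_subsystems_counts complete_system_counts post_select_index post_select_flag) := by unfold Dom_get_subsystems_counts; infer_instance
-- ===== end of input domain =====

-- B replaces A's single simultaneous pass (zipping each key's parts against a list of mutable dicts)
-- by a split-once table followed by an independent per-subsystem scan (transposed loop nesting);
-- same cost, different decomposition (objective: alternative). Equivalence is on the return value.

-- ===== PORT A =====
-- the post-selection test 'post_select_index is None or parts[post_select_index] == post_select_flag'
-- (appears verbatim in both Pythons); pyGetD is total — Pre_ guarantees the index is in range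
-- whenever either program actually evaluates it
def pvSelect (post_select_index : Option Int) (post_select_flag : Option String) (parts : List String) : Bool :=
  match post_select_index with
  | none => true
  | some i =>
    match post_select_flag with
    | some f => PySem.List.pyGetD parts i "" == f
    | none => false

-- A's inner 'for k, d_l in zip(subsystem_measurements, subsystems_counts): if …: d_l[k] += count'
def pvRowUpdate (sel : Bool) (count : Int) : List String → List (PySem.Dict String Int) → List (PySem.Dict String Int)
  | _, [] => []
  | [], dd :: ds => dd :: ds
  | p :: ps, dd :: ds => (if sel then dd.modify p 0 (· + count) else dd) :: pvRowUpdate sel count ps ds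

def get_subsystems_counts (complete_system_counts : List (String × Int)) (post_select_index : Option Int) (post_select_flag : Option String) : List (List (String × Int)) :=
  let d := PySem.Dict.ofList complete_system_counts
  let mixed_measurements := d.keys
  -- '[defaultdict(int) for _ in mixed_measurements[0].split()]'; headD is the total form of
  -- mixed_measurements[0] (Pre_ excludes the empty dict, where Python raises IndexError)
  let subs0 : List (PySem.Dict String Int) :=
    (PySem.Str.split₀ (mixed_measurements.headD "")).map (fun _ => PySem.Dict.empty)
  let final := mixed_measurements.foldl (fun subs m =>
    pvRowUpdate (pvSelect post_select_index post_select_flag (PySem.Str.split₀ m))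
      (d.getD m 0) (PySem.Str.split₀ m) subs) subs0
  final.map (fun dl => dl.items)

-- ===== PORT B =====
def get_subsystems_counts_alt (complete_system_counts : List (String × Int)) (post_select_index : Option Int) (post_select_flag : Option String) : List (List (String × Int)) :=
  let table := (PySem.Dict.ofList complete_system_counts).items.map
    (fun p => (PySem.Str.split₀ p.1, p.2))
  -- 'num = len(table[0][0])'; headD is the total form (Pre_ excludes the empty dict)
  let num := (table.headD ([], 0)).1.length
  (List.range num).map (fun idx =>
    (table.foldl (fun acc pc =>
      if idx < pc.1.length ∧ pvSelect post_select_index post_select_flag pc.1 = true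
      then acc.insert (pc.1.getD idx "") (acc.getD (pc.1.getD idx "") 0 + pc.2)
      else acc) PySem.Dict.empty).items)

-- ===== PRECONDITION & SPEC =====
-- Pre_ excludes exactly the inputs where Python A raises: the empty dict (IndexError on
-- mixed_measurements[0]) and, when post_select_index is given and a first subsystem exists,
-- any key whose nonempty split the index does not reach (IndexError on parts[post_select_index]).
def Pre_get_subsystems_counts (complete_system_counts : List (String × Int)) (post_select_index : Option Int) (post_select_flag : Option String) : Prop :=
  complete_system_counts ≠ [] ∧
  (post_select_index.isSome = true →
    (PySem.Str.split₀ ((complete_system_counts.headD ("", 0)).1)).length ≠ 0 →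
    ∀ p ∈ complete_system_counts, PySem.Str.split₀ p.1 ≠ [] →
      PySem.Raise.InRange (PySem.Str.split₀ p.1).length (post_select_index.getD 0))
instance (complete_system_counts : List (String × Int)) (post_select_index : Option Int) (post_select_flag : Option String) : Decidable (Pre_get_subsystems_counts complete_system_counts post_select_index post_select_flag) := by unfold Pre_get_subsystems_counts; infer_instance
def pvWitness_get_subsystems_counts : (List (String × Int)) × Option Int × Option String :=
  ([("11 010", 3), ("01 011", 2)], some 0, some "11")
def Spec_get_subsystems_counts (complete_system_counts : List (String × Int)) (post_select_index : Option Int) (post_select_flag : Option String) (out : List (List (String × Int))) : Prop := out = get_subsystems_counts_alt complete_system_counts post_select_index post_select_flag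
instance (complete_system_counts : List (String × Int)) (post_select_index : Option Int) (post_select_flag : Option String) (out : List (List (String × Int))) : Decidable (Spec_get_subsystems_counts complete_system_counts post_select_index post_select_flag out) := by unfold Spec_get_subsystems_counts; infer_instance

-- ===== CLAIM (what is proved, stated in full; the proofs are below) =====
def Claim_equal_get_subsystems_counts : Prop := ∀ (complete_system_counts : List (String × Int)) (post_select_index : Option Int) (post_select_flag : Option String), Dom_get_subsystems_counts complete_system_counts post_select_index post_select_flag → Pre_get_subsystems_counts complete_system_counts post_select_index post_select_flag → Spec_get_subsystems_counts complete_system_counts post_select_index post_select_flag (get_subsystems_counts complete_system_counts post_select_index post_select_flag)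

-- ===== LEMMAS AND PROOFS =====

-- one row of A, transposed: updating the list of per-subsystem dicts simultaneously is the same
-- as updating each index's dict independently
theorem pvRow_transpose (sel : Bool) (count : Int) :
    ∀ (n : Nat) (parts : List String) (f : Nat → PySem.Dict String Int),
    pvRowUpdate sel count parts ((List.range n).map f) =
    (List.range n).map (fun idx =>
      if idx < parts.length ∧ sel = true
      then (f idx).insert (parts.getD idx "") ((f idx).getD (parts.getD idx "") 0 + count)
      else f idx) := by
  intro n
  induction n with
  | zero => intro parts f; cases parts <;> rfl
  | succ n ih =>
    intro parts f
    rw [List.range_succ_eq_map, List.map_cons, List.map_cons, List.map_map, List.map_map]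
    cases parts with
    | nil =>
      simp [pvRowUpdate]
    | cons p ps =>
      show (if sel then (f 0).modify p 0 (· + count) else f 0) :: pvRowUpdate sel count ps ((List.range n).map (f ∘ Nat.succ)) = _
      rw [ih ps (f ∘ Nat.succ)]
      congr 1
      · by_cases hs : sel = true <;> simp [hs, PySem.Dict.modify]
      · apply List.map_congr_left
        intro idx _
        simp [Function.comp]

-- A's whole fold, transposed: folding row updates over any list equals, at each index,
-- an independent per-index fold
theorem pvFold_transpose {α : Type} (sel : α → Bool) (cnt : α → Int) (parts : α → List String) :
    ∀ (L : List α) (n : Nat) (f : Nat → PySem.Dict String Int),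
    L.foldl (fun subs a => pvRowUpdate (sel a) (cnt a) (parts a) subs) ((List.range n).map f) =
    (List.range n).map (fun idx => L.foldl (fun acc a =>
      if idx < (parts a).length ∧ sel a = true
      then acc.insert ((parts a).getD idx "") (acc.getD ((parts a).getD idx "") 0 + cnt a)
      else acc) (f idx)) := by
  intro L
  induction L with
  | nil => intro n f; rfl
  | cons a L ih =>
    intro n f
    rw [List.foldl_cons, pvRow_transpose, ih]
    rfl

theorem pv_split_empty : (PySem.Str.split₀ "") = ([] : List String) := by decide

theorem get_subsystems_counts_spec_aux (complete_system_counts : List (String × Int)) (post_select_index : Option Int) (post_select_flag : Option String) :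
    get_subsystems_counts complete_system_counts post_select_index post_select_flag =
    get_subsystems_counts_alt complete_system_counts post_select_index post_select_flag := by
  unfold get_subsystems_counts get_subsystems_counts_alt
  dsimp only
  set d := PySem.Dict.ofList complete_system_counts with hd
  have hnd : d.keys.Nodup := PySem.Dict.nodup_keys_ofList complete_system_counts
  have hitems : d.items = d.keys.map (fun k => (k, d.getD k 0)) :=
    PySem.Dict.items_eq_map_keys d hnd 0
  -- B's table, expressed over the key list
  rw [hitems, List.map_map]
  have htable : ((fun p : String × Int => (PySem.Str.split₀ p.1, p.2)) ∘ fun k => (k, d.getD k 0))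
      = fun k => (PySem.Str.split₀ k, d.getD k 0) := rfl
  rw [htable]
  -- the two 'num's agree
  have hnum : (((d.keys.map (fun k => (PySem.Str.split₀ k, d.getD k 0))).headD ([], 0)).1).length
      = (PySem.Str.split₀ (d.keys.headD "")).length := by
    cases d.keys with
    | nil => simp [pv_split_empty]
    | cons k t => rfl
  rw [hnum]
  -- A's initial dict list as a map over List.range
  have hinit : (PySem.Str.split₀ (d.keys.headD "")).map (fun _ => (PySem.Dict.empty : PySem.Dict String Int))
      = (List.range (PySem.Str.split₀ (d.keys.headD "")).length).map
          (fun _ => (PySem.Dict.empty : PySem.Dict String Int)) := by simp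
  rw [hinit]
  rw [pvFold_transpose (fun k => pvSelect post_select_index post_select_flag (PySem.Str.split₀ k))
    (fun k => d.getD k 0) (fun k => PySem.Str.split₀ k) d.keys
    (PySem.Str.split₀ (d.keys.headD "")).length (fun _ => PySem.Dict.empty)]
  rw [List.map_map]
  apply List.map_congr_left
  intro idx _
  simp only [Function.comp, List.foldl_map]

-- ===== VERDICT (by name: the statement is the Claim_ definition above) =====
theorem get_subsystems_counts_spec : Claim_equal_get_subsystems_counts := by
  intro csc psi psf _ _
  exact get_subsystems_counts_spec_aux csc psi psf
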